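-- pv_equiv track=rewrite | github.com/Jazz23/CodeSlobCleanup | skills/code-slob-cleanup/scripts/verify.py | clean_traceback
-- ===== SOURCE A (Python) =====
-- def clean_traceback(tb_str: str) -> str:
--     """Filters traceback to return only the exception message."""
--     lines = tb_str.splitlines()
--     for line in reversed(lines):
--         if 'AssertionError:' in line:
--             return line.strip()
--         if 'NameError:' in line or 'TypeError:' in line or 'ValueError:' in line:
--             return line.strip()
--     return ""
-- ===== SOURCE B (Python) =====
-- MARKERS = ('AssertionError:', 'NameError:', 'TypeError:', 'ValueError:')
--
-- def clean_traceback(tb_str: str) -> str: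
--     """Filters traceback to return only the exception message."""
--     result = ""
--     for line in tb_str.splitlines():
--         if any(m in line for m in MARKERS):
--             result = line.strip()
--     return result
-- ===== Notes on version B (the rewrite author's own statement) =====
-- stated objective: simpler
-- what changed: Replaced the reverse scan with early returns by a single forward fold over the lines that keeps the last matching line in an accumulator, with the four error markers unified into one tuple tested by any().
import Mathlib
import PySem

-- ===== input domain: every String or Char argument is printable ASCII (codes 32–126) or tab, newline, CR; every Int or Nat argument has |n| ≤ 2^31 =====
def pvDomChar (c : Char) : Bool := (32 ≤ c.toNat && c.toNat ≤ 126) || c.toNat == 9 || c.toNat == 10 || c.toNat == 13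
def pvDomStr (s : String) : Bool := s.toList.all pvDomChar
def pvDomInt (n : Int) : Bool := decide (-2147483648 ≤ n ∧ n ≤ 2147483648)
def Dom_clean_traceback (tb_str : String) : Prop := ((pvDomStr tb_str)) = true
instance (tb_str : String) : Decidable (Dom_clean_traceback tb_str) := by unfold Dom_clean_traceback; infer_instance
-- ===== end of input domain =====

-- B replaces A's reverse scan with early returns by one forward fold keeping the last matching line (objective: simpler).

-- ===== PORT A =====
def cleanLoopA : List String → String
  | [] => ""
  | line :: rest =>
    if PySem.Str.isIn "AssertionError:" line then PySem.Str.strip line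
    else if (PySem.Str.isIn "NameError:" line || PySem.Str.isIn "TypeError:" line
             || PySem.Str.isIn "ValueError:" line) then PySem.Str.strip line
    else cleanLoopA rest

def clean_traceback (tb_str : String) : String :=
  cleanLoopA (PySem.Str.splitlines tb_str).reverse

-- ===== PORT B =====
def pvMarkers : List String := ["AssertionError:", "NameError:", "TypeError:", "ValueError:"]

def clean_traceback_alt (tb_str : String) : String :=
  (PySem.Str.splitlines tb_str).foldl
    (fun result line =>
      if pvMarkers.any (fun m => PySem.Str.isIn m line) then PySem.Str.strip line else result)
    ""

-- ===== PRECONDITION & SPEC =====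
def Spec_clean_traceback (tb_str : String) (out : String) : Prop := out = clean_traceback_alt tb_str
instance (tb_str : String) (out : String) : Decidable (Spec_clean_traceback tb_str out) := by unfold Spec_clean_traceback; infer_instance

-- ===== CLAIM (what is proved, stated in full; the proofs are below) =====
def Claim_equal_clean_traceback : Prop := ∀ (tb_str : String), Dom_clean_traceback tb_str → Spec_clean_traceback tb_str (clean_traceback tb_str)

-- ===== LEMMAS AND PROOFS =====

-- the one-line step of B's fold
def pvStep (result line : String) : String :=
  if pvMarkers.any (fun m => PySem.Str.isIn m line) then PySem.Str.strip line else result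

-- A's reverse scan, generalized with an accumulator returned at the end
def cleanLoopAcc : List String → String → String
  | [], acc => acc
  | line :: rest, acc =>
    if PySem.Str.isIn "AssertionError:" line then PySem.Str.strip line
    else if (PySem.Str.isIn "NameError:" line || PySem.Str.isIn "TypeError:" line
             || PySem.Str.isIn "ValueError:" line) then PySem.Str.strip line
    else cleanLoopAcc rest acc

lemma cleanLoopA_eq_acc (l : List String) : cleanLoopA l = cleanLoopAcc l "" := by
  induction l with
  | nil => rfl
  | cons x xs ih => simp [cleanLoopA, cleanLoopAcc, ih]

lemma step_eq (line acc : String) :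
    (if PySem.Str.isIn "AssertionError:" line then PySem.Str.strip line
     else if (PySem.Str.isIn "NameError:" line || PySem.Str.isIn "TypeError:" line
              || PySem.Str.isIn "ValueError:" line) then PySem.Str.strip line
     else acc) = pvStep acc line := by
  simp only [pvStep, pvMarkers, List.any_cons, List.any_nil, Bool.or_false]
  by_cases h1 : PySem.Str.isIn "AssertionError:" line = true <;>
    by_cases h2 : (PySem.Str.isIn "NameError:" line || PySem.Str.isIn "TypeError:" line
                   || PySem.Str.isIn "ValueError:" line) = true <;>
    simp_all [Bool.or_assoc]

lemma cleanLoopAcc_append (m : List String) (x acc : String) :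
    cleanLoopAcc (m ++ [x]) acc = cleanLoopAcc m (pvStep acc x) := by
  induction m with
  | nil => simpa [cleanLoopAcc] using step_eq x acc
  | cons y ys ih => simp [cleanLoopAcc, ih]

lemma foldl_eq_cleanLoopAcc (l : List String) (acc : String) :
    l.foldl pvStep acc = cleanLoopAcc l.reverse acc := by
  induction l generalizing acc with
  | nil => rfl
  | cons x xs ih =>
    simp only [List.foldl_cons, List.reverse_cons, cleanLoopAcc_append, ih]

-- ===== VERDICT (by name: the statement is the Claim_ definition above) =====
theorem clean_traceback_spec : Claim_equal_clean_traceback := by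
  intro tb _
  unfold Spec_clean_traceback clean_traceback clean_traceback_alt
  rw [cleanLoopA_eq_acc]
  exact (foldl_eq_cleanLoopAcc _ _).symm
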